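-- pv_equiv track=rewrite | github.com/Applied-Linear-Algebra-NIT/Connect-4 | Answers/connect4.py | check_down_left
-- ===== SOURCE A (Python) =====
-- def check_down_left(i, j, board, count, icon):
--     try:
--         if board[i][j] == icon and count == 0:
--             return True
--         elif board[i][j] == icon:
--             return check_down_left(i+1, j-1, board, count-1, icon)
--         else:
--             return False
--     except:
--         return False
-- ===== SOURCE B (Python) =====
-- def check_down_left(i, j, board, count, icon):
--     # A run of count+1 matching icons must start at (i, j) and go down-left.
--     if count < 0:
--         return False
--     try:
--         return all(board[i + k][j - k] == icon for k in range(count + 1))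
--     except IndexError:
--         return False
-- ===== Notes on version B (the rewrite author's own statement) =====
-- stated objective: idiomatic
-- what changed: Replaces the tail recursion (with a bare except swallowing the IndexError) by a single all() over range(count+1) checking every diagonal cell, with an explicit count<0 early return.
import Mathlib
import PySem

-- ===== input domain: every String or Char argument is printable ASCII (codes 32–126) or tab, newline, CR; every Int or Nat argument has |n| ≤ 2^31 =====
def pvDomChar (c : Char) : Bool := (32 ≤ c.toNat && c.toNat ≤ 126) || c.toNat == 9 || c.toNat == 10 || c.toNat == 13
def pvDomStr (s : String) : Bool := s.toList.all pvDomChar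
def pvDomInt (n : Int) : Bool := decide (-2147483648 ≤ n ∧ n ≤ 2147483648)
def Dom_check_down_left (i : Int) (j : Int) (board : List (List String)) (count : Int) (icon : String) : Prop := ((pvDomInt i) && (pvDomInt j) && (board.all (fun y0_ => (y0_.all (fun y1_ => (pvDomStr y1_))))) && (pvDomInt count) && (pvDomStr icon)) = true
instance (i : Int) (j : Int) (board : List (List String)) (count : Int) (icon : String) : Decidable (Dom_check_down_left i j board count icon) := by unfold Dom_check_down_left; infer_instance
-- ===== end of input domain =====

-- B replaces A's tail recursion (bare except → False) by one all() over range(count+1)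
-- of per-cell checks, with an explicit count<0 early return (idiomatic decomposition; no speed claim).

-- ===== PORT A =====
-- A recurses with i+1; the recursive call only happens when board[i] succeeded,
-- i.e. i < board.length, so (board.length - i).toNat decreases.
def check_down_left (i : Int) (j : Int) (board : List (List String)) (count : Int) (icon : String) : Bool :=
  match h : PySem.List.pyGet? board i with
  | none => false                                   -- except: → False
  | some row =>
    match PySem.List.pyGet? row j with
    | none => false                                 -- except: → False
    | some cell =>
      if cell = icon ∧ count = 0 then true
      else if cell = icon then check_down_left (i+1) (j-1) board (count-1) icon
      else false
termination_by ((board.length : Int) - i).toNat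
decreasing_by
  have hin : PySem.Raise.InRange board.length i := by
    by_contra hc
    rw [(PySem.List.pyGet?_eq_none_iff _ _).mpr hc] at h
    simp at h
  unfold PySem.Raise.InRange at hin
  omega

-- ===== PORT B =====
-- board[i+k][j-k] == icon, false on IndexError (the exception Source B's try/except catches).
def pvCellMatch (board : List (List String)) (r : Int) (c : Int) (icon : String) : Bool :=
  match PySem.List.pyGet? board r with
  | none => false
  | some row =>
    match PySem.List.pyGet? row c with
    | none => false
    | some cell => cell == icon

-- all(board[i+k][j-k] == icon for k in range(count+1)): n cells left to check, k the next index;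
-- && short-circuits exactly as all() over the generator does.
def pvAllDiag (board : List (List String)) (i : Int) (j : Int) (icon : String) : Nat → Int → Bool
  | 0, _ => true
  | n + 1, k => pvCellMatch board (i + k) (j - k) icon && pvAllDiag board i j icon n (k + 1)

def check_down_left_alt (i : Int) (j : Int) (board : List (List String)) (count : Int) (icon : String) : Bool :=
  if count < 0 then false
  else pvAllDiag board i j icon (count + 1).toNat 0

-- ===== PRECONDITION & SPEC =====
def Spec_check_down_left (i : Int) (j : Int) (board : List (List String)) (count : Int) (icon : String) (out : Bool) : Prop := out = check_down_left_alt i j board count icon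
instance (i : Int) (j : Int) (board : List (List String)) (count : Int) (icon : String) (out : Bool) : Decidable (Spec_check_down_left i j board count icon out) := by unfold Spec_check_down_left; infer_instance

-- ===== CLAIM (what is proved, stated in full; the proofs are below) =====
def Claim_equal_check_down_left : Prop := ∀ (i : Int) (j : Int) (board : List (List String)) (count : Int) (icon : String), Dom_check_down_left i j board count icon → Spec_check_down_left i j board count icon (check_down_left i j board count icon)

-- ===== LEMMAS AND PROOFS =====

-- stepping the start index of the scan is the same as stepping the diagonal's origin
theorem pvAllDiag_shift (board : List (List String)) (i j : Int) (icon : String) (n : Nat) (k : Int) :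
    pvAllDiag board i j icon n (k + 1) = pvAllDiag board (i + 1) (j - 1) icon n k := by
  induction n generalizing k with
  | zero => rfl
  | succ n ih =>
    unfold pvAllDiag
    rw [show i + (k + 1) = i + 1 + k from by ring, show j - (k + 1) = j - 1 - k from by ring,
        ih (k + 1)]

theorem main_eq (i j : Int) (board : List (List String)) (count : Int) (icon : String) :
    check_down_left i j board count icon = check_down_left_alt i j board count icon := by
  fun_induction check_down_left i j board count icon with
  | case1 i j count h =>
    -- board[i] raises: A is False, B's first cell check fails
    unfold check_down_left_alt
    split
    · rfl
    next hc =>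
      obtain ⟨m, hm⟩ : ∃ m, (count + 1).toNat = m + 1 := ⟨count.toNat, by omega⟩
      rw [hm]
      unfold pvAllDiag
      simp [pvCellMatch, h]
  | case2 i j count row h h2 =>
    -- board[i][j] raises: A is False, B's first cell check fails
    unfold check_down_left_alt
    split
    · rfl
    next hc =>
      obtain ⟨m, hm⟩ : ∃ m, (count + 1).toNat = m + 1 := ⟨count.toNat, by omega⟩
      rw [hm]
      unfold pvAllDiag
      simp [pvCellMatch, h, h2]
  | case3 i j count row h cell h2 hif =>
    -- match and count == 0: A is True, B checks the single cell (i, j)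
    obtain ⟨hcell, hcnt⟩ := hif
    subst hcnt
    unfold check_down_left_alt
    rw [if_neg (by omega : ¬ (0:Int) < 0), show ((0:Int) + 1).toNat = 1 from rfl]
    unfold pvAllDiag
    simp [pvAllDiag, pvCellMatch, h, h2, hcell]
  | case4 i j count row h h2 hif ih =>
    -- match and count ≠ 0: A recurses; B's head check is true and the scan's origin shifts
    have hcnt : count ≠ 0 := fun hc => hif ⟨rfl, hc⟩
    rw [ih]
    unfold check_down_left_alt
    by_cases hneg : count < 0
    · rw [if_pos hneg, if_pos (by omega : count - 1 < 0)]
    · rw [if_neg hneg, if_neg (by omega : ¬ count - 1 < 0)]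
      rw [show (count + 1).toNat = (count - 1 + 1).toNat + 1 from by omega]
      unfold pvAllDiag
      have hhead : pvCellMatch board (i + 0) (j - 0) icon = true := by
        simp [pvCellMatch, h, h2]
      rw [hhead, Bool.true_and, pvAllDiag_shift]
      cases hE : (count - 1 + 1).toNat with
      | zero => rfl
      | succ n => rfl
  | case5 i j count row h cell h2 hif hcell =>
    -- mismatch: A is False, B's first cell check fails
    unfold check_down_left_alt
    split
    · rfl
    next hc =>
      obtain ⟨m, hm⟩ : ∃ m, (count + 1).toNat = m + 1 := ⟨count.toNat, by omega⟩
      rw [hm]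
      unfold pvAllDiag
      simp [pvCellMatch, h, h2, hcell]

-- ===== VERDICT (by name: the statement is the Claim_ definition above) =====
theorem check_down_left_spec : Claim_equal_check_down_left := by
  intro i j board count icon _
  unfold Spec_check_down_left
  exact main_eq i j board count icon
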